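-- pv_equiv track=rewrite | github.com/jcarlosroldan/competitive-programming | rosalind/bioinformatics stronghold/25 long.py | joins
-- ===== SOURCE A (Python) =====
-- from math import ceil
--
-- def joins(str1, str2):
-- 	''' Dataset ensures that minimum overlap is more than half their length. '''
-- 	res = set()
-- 	max_overlap = min(len(str1), len(str2))
-- 	for overlap in range(ceil(max_overlap / 2), max_overlap + 1):
-- 		if str1[-overlap:] == str2[:overlap]:
-- 			res.add(str1[:-overlap] + str2)
-- 		if str2[-overlap:] == str1[:overlap]:
-- 			res.add(str2[:-overlap] + str1)
-- 	return res
-- ===== SOURCE B (Python) =====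
-- def joins(str1, str2):
--     ''' Same join-by->=half-overlap; candidate overlaps are screened with
--     rolling polynomial hashes, and the slices are compared only on a hash match. '''
--     BASE, MOD = 131, (1 << 61) - 1
--     n1, n2 = len(str1), len(str2)
--     m = min(n1, n2)
--     res = set()
--     if m == 0:
--         # one string is empty: the only join is the other string (overlap 0)
--         res.add(str1 + str2)
--         return res
--     lo = (m + 1) // 2
--     s1h = p1h = s2h = p2h = 0  # hashes of str1[n1-k:], str2[:k], str2[n2-k:], str1[:k]
--     pw = 1                     # BASE**(k-1) % MOD
--     for k in range(1, m + 1):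
--         s1h = (ord(str1[n1 - k]) * pw + s1h) % MOD
--         s2h = (ord(str2[n2 - k]) * pw + s2h) % MOD
--         p1h = (p1h * BASE + ord(str2[k - 1])) % MOD
--         p2h = (p2h * BASE + ord(str1[k - 1])) % MOD
--         pw = pw * BASE % MOD
--         if k >= lo:
--             if s1h == p1h and str1[n1 - k:] == str2[:k]:
--                 res.add(str1[:n1 - k] + str2)
--             if s2h == p2h and str2[n2 - k:] == str1[:k]:
--                 res.add(str2[:n2 - k] + str1)
--     return res
-- ===== Notes on version B (the rewrite author's own statement) =====
-- stated objective: alternative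
-- what changed: B maintains rolling polynomial hashes of the candidate prefix/suffix pairs and compares the actual slices only when the hashes agree, instead of A's building and comparing two fresh slices for every candidate overlap; the empty-string case is handled directly instead of via the overlap-0 slice quirk.
import Mathlib
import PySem

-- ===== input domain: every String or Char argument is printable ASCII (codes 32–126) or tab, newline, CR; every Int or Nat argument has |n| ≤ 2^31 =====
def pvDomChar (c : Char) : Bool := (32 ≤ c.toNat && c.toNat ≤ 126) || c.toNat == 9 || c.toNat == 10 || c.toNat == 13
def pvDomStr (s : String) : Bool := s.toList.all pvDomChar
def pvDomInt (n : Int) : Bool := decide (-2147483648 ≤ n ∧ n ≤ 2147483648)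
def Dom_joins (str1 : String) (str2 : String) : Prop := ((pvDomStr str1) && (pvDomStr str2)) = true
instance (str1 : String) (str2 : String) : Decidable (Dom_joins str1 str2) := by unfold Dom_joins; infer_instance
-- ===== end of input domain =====

-- B screens each candidate overlap with rolling polynomial hashes and only compares the
-- actual slices on a hash match (alternative algorithm; same worst-case cost as A).

-- ===== PORT A =====
-- loop body of A: the two conditional set-adds for one candidate overlap
def astep (l1 l2 : List Char) (res : PySem.Set String) (overlap : Int) : PySem.Set String :=
  let res := if PySem.List.slice l1 (some (-overlap)) none = PySem.List.slice l2 none (some overlap)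
    then PySem.Set.add res (String.ofList (PySem.List.slice l1 none (some (-overlap)) ++ l2)) else res
  if PySem.List.slice l2 (some (-overlap)) none = PySem.List.slice l1 none (some overlap)
    then PySem.Set.add res (String.ofList (PySem.List.slice l2 none (some (-overlap)) ++ l1)) else res

def joins (str1 : String) (str2 : String) : List String :=
  let l1 := str1.toList
  let l2 := str2.toList
  let maxOverlap : Int := ((min l1.length l2.length : Nat) : Int)
  -- ceil(max_overlap / 2): ported exactly as the integer ceiling division -((-x) // 2)
  let lo : Int := -(PySem.Int.floordiv (-maxOverlap) 2)
  (PySem.List.pyRange lo (maxOverlap + 1) 1).foldl (astep l1 l2) PySem.Set.empty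

-- ===== PORT B =====
-- loop body of B: update the four rolling hashes and the power, then the guarded adds
-- (ord(c) is ported as c.toNat — exact on the ASCII domain)
def bstep (l1 l2 : List Char) (lo : Int)
    (st : PySem.Set String × Int × Int × Int × Int × Int) (k : Int) :
    PySem.Set String × Int × Int × Int × Int × Int :=
  let n1 : Int := l1.length
  let n2 : Int := l2.length
  let res := st.1
  let s1h := PySem.Int.mod (((PySem.List.pyGetD l1 (n1 - k) 'A').toNat : Int) * st.2.2.2.2.2 + st.2.1) 2305843009213693951
  let s2h := PySem.Int.mod (((PySem.List.pyGetD l2 (n2 - k) 'A').toNat : Int) * st.2.2.2.2.2 + st.2.2.2.1) 2305843009213693951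
  let p1h := PySem.Int.mod (st.2.2.1 * 131 + ((PySem.List.pyGetD l2 (k - 1) 'A').toNat : Int)) 2305843009213693951
  let p2h := PySem.Int.mod (st.2.2.2.2.1 * 131 + ((PySem.List.pyGetD l1 (k - 1) 'A').toNat : Int)) 2305843009213693951
  let pw := PySem.Int.mod (st.2.2.2.2.2 * 131) 2305843009213693951
  if lo ≤ k then
    let res := if s1h = p1h ∧ PySem.List.slice l1 (some (n1 - k)) none = PySem.List.slice l2 none (some k)
      then PySem.Set.add res (String.ofList (PySem.List.slice l1 none (some (n1 - k)) ++ l2)) else res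
    let res := if s2h = p2h ∧ PySem.List.slice l2 (some (n2 - k)) none = PySem.List.slice l1 none (some k)
      then PySem.Set.add res (String.ofList (PySem.List.slice l2 none (some (n2 - k)) ++ l1)) else res
    (res, s1h, p1h, s2h, p2h, pw)
  else (res, s1h, p1h, s2h, p2h, pw)

def joins_alt (str1 : String) (str2 : String) : List String :=
  let l1 := str1.toList
  let l2 := str2.toList
  let m := min l1.length l2.length
  let res : PySem.Set String := PySem.Set.empty
  if m = 0 then
    -- one string is empty: the only join is the other string (overlap 0)
    PySem.Set.add res (String.ofList (l1 ++ l2))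
  else
    let lo : Int := PySem.Int.floordiv ((m : Int) + 1) 2
    ((PySem.List.pyRange 1 ((m : Int) + 1) 1).foldl (bstep l1 l2 lo) (res, 0, 0, 0, 0, 1)).1

-- ===== PRECONDITION & SPEC =====
def Spec_joins (str1 : String) (str2 : String) (out : List String) : Prop := out = joins_alt str1 str2
instance (str1 : String) (str2 : String) (out : List String) : Decidable (Spec_joins str1 str2 out) := by unfold Spec_joins; infer_instance

-- ===== CLAIM (what is proved, stated in full; the proofs are below) =====
def Claim_equal_joins : Prop := ∀ (str1 : String) (str2 : String), Dom_joins str1 str2 → Spec_joins str1 str2 (joins str1 str2)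

-- ===== LEMMAS AND PROOFS =====

-- canonical polynomial hash of a character list (what the rolling hashes compute)
def hcan (t : List Char) : Int :=
  t.foldl (fun a c => (a * 131 + (c.toNat : Int)) % 2305843009213693951) 0

lemma modM_eq (x : Int) : PySem.Int.mod x 2305843009213693951 = x % 2305843009213693951 :=
  PySem.Int.mod_eq_emod_of_pos (by norm_num)

lemma addmul_mod (c p s : Int) :
    (c * (p % 2305843009213693951) + s) % 2305843009213693951
      = (c * p + s) % 2305843009213693951 := by
  conv_lhs => rw [Int.add_emod, Int.mul_emod, Int.emod_emod_of_dvd _ dvd_rfl]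
  conv_rhs => rw [Int.add_emod, Int.mul_emod]

lemma mul_add_mod_left (a b s : Int) :
    ((a % 2305843009213693951) * b + s) % 2305843009213693951
      = (a * b + s) % 2305843009213693951 := by
  conv_lhs => rw [Int.add_emod, Int.mul_emod, Int.emod_emod_of_dvd _ dvd_rfl]
  conv_rhs => rw [Int.add_emod, Int.mul_emod]

lemma add_mod_right_absorb (x y : Int) :
    (x + y % 2305843009213693951) % 2305843009213693951
      = (x + y) % 2305843009213693951 := by
  rw [Int.add_emod, Int.emod_emod_of_dvd _ dvd_rfl, ← Int.add_emod]

lemma hcan_seed (t : List Char) : ∀ a : Int,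
    t.foldl (fun a c => (a * 131 + (c.toNat : Int)) % 2305843009213693951) (a % 2305843009213693951)
      = (a * 131 ^ t.length + hcan t) % 2305843009213693951 := by
  induction t with
  | nil => intro a; simp [hcan]
  | cons c t ih =>
    intro a
    have hc : hcan (c :: t)
        = ((c.toNat : Int) * 131 ^ t.length + hcan t) % 2305843009213693951 := by
      have := ih (c.toNat : Int)
      simp only [hcan, List.foldl_cons, zero_mul, zero_add] at *
      exact this
    simp only [List.foldl_cons, mul_add_mod_left]
    rw [ih (a * 131 + (c.toNat : Int)), hc, add_mod_right_absorb]
    have : (c :: t).length = t.length + 1 := rfl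
    rw [this, pow_succ]
    ring_nf

lemma hcan_cons (c : Char) (t : List Char) :
    hcan (c :: t) = ((c.toNat : Int) * 131 ^ t.length + hcan t) % 2305843009213693951 := by
  have := hcan_seed t (c.toNat : Int)
  simp only [hcan, List.foldl_cons, zero_mul, zero_add] at *
  exact this

lemma hcan_snoc (t : List Char) (c : Char) :
    hcan (t ++ [c]) = (hcan t * 131 + (c.toNat : Int)) % 2305843009213693951 := by
  simp [hcan, List.foldl_append]

-- the ceiling ceil(m/2) A computes is the (m+1)//2 B computes
lemma lo_eq (m : Nat) :
    -(PySem.Int.floordiv (-(m : Int)) 2) = PySem.Int.floordiv ((m : Int) + 1) 2 := by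
  have h := (PySem.Int.floordiv_eq_iff_of_pos (a := (m : Int) + 1) (b := 2)
    (q := PySem.Int.floordiv ((m : Int) + 1) 2) (by norm_num)).mp rfl
  exact (PySem.Int.neg_floordiv_neg_eq_iff_of_pos (by norm_num)).mpr (by omega)

lemma lo_pos (m : Nat) (hm : 1 ≤ m) : 1 ≤ PySem.Int.floordiv ((m : Int) + 1) 2 := by
  have h := (PySem.Int.floordiv_eq_iff_of_pos (a := (m : Int) + 1) (b := 2)
    (q := PySem.Int.floordiv ((m : Int) + 1) 2) (by norm_num)).mp rfl
  omega

-- main loop invariant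
lemma loop_inv (l1 l2 : List Char) (lo : Int) (hlo : 1 ≤ lo)
    (k : Nat) (hk : k ≤ min l1.length l2.length) :
    (PySem.List.pyRange 1 ((k : Int) + 1) 1).foldl (bstep l1 l2 lo) (PySem.Set.empty, 0, 0, 0, 0, 1)
      = ((PySem.List.pyRange lo ((k : Int) + 1) 1).foldl (astep l1 l2) PySem.Set.empty,
         hcan (l1.drop (l1.length - k)), hcan (l2.take k),
         hcan (l2.drop (l2.length - k)), hcan (l1.take k),
         131 ^ k % 2305843009213693951) := by
  induction k with
  | zero =>
    rw [PySem.List.pyRange_one_eq_nil (by omega), PySem.List.pyRange_one_eq_nil (by omega)]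
    simp [hcan]
  | succ k ih =>
    have hk' : k ≤ min l1.length l2.length := by omega
    have h1 : k + 1 ≤ l1.length := by omega
    have h2 : k + 1 ≤ l2.length := by omega
    have hsplit : PySem.List.pyRange 1 (((k + 1 : Nat) : Int) + 1) 1
        = PySem.List.pyRange 1 ((k : Int) + 1) 1 ++ [(k : Int) + 1] := by
      push_cast
      exact PySem.List.pyRange_one_succ_right (by omega)
    rw [hsplit, List.foldl_append, ih hk']
    simp only [List.foldl_cons, List.foldl_nil]
    simp only [bstep, modM_eq]
    have e1 : (l1.length : Int) - ((k : Int) + 1) = ((l1.length - (k + 1) : Nat) : Int) := by omega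
    have e2 : (l2.length : Int) - ((k : Int) + 1) = ((l2.length - (k + 1) : Nat) : Int) := by omega
    have eK : (k : Int) + 1 - 1 = ((k : Nat) : Int) := by omega
    have eKp : (k : Int) + 1 = (((k + 1 : Nat)) : Int) := by omega
    have g1 : PySem.List.pyGetD l1 ((l1.length : Int) - ((k : Int) + 1)) 'A'
        = l1[l1.length - (k + 1)]'(by omega) := by
      rw [e1, PySem.List.pyGetD_natCast, List.getD_eq_getElem _ _ (by omega)]
    have g2 : PySem.List.pyGetD l2 ((l2.length : Int) - ((k : Int) + 1)) 'A'
        = l2[l2.length - (k + 1)]'(by omega) := by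
      rw [e2, PySem.List.pyGetD_natCast, List.getD_eq_getElem _ _ (by omega)]
    have g3 : PySem.List.pyGetD l2 ((k : Int) + 1 - 1) 'A' = l2[k]'(by omega) := by
      rw [eK, PySem.List.pyGetD_natCast, List.getD_eq_getElem _ _ (by omega)]
    have g4 : PySem.List.pyGetD l1 ((k : Int) + 1 - 1) 'A' = l1[k]'(by omega) := by
      rw [eK, PySem.List.pyGetD_natCast, List.getD_eq_getElem _ _ (by omega)]
    rw [g1, g2, g3, g4]
    have hd1 : (((l1[l1.length - (k + 1)]'(by omega)).toNat : Int) * (131 ^ k % 2305843009213693951)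
          + hcan (l1.drop (l1.length - k))) % 2305843009213693951
        = hcan (l1.drop (l1.length - (k + 1))) := by
      rw [addmul_mod]
      have hdrop : l1.drop (l1.length - (k + 1))
          = l1[l1.length - (k + 1)]'(by omega) :: l1.drop (l1.length - k) := by
        rw [List.drop_eq_getElem_cons (by omega)]
        congr 2
        omega
      rw [hdrop, hcan_cons, List.length_drop,
        show l1.length - (l1.length - k) = k from by omega]
    have hd2 : (((l2[l2.length - (k + 1)]'(by omega)).toNat : Int) * (131 ^ k % 2305843009213693951)
          + hcan (l2.drop (l2.length - k))) % 2305843009213693951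
        = hcan (l2.drop (l2.length - (k + 1))) := by
      rw [addmul_mod]
      have hdrop : l2.drop (l2.length - (k + 1))
          = l2[l2.length - (k + 1)]'(by omega) :: l2.drop (l2.length - k) := by
        rw [List.drop_eq_getElem_cons (by omega)]
        congr 2
        omega
      rw [hdrop, hcan_cons, List.length_drop,
        show l2.length - (l2.length - k) = k from by omega]
    have ht2 : (hcan (l2.take k) * 131 + ((l2[k]'(by omega)).toNat : Int)) % 2305843009213693951
        = hcan (l2.take (k + 1)) := by
      have h : l2.take (k + 1) = l2.take k ++ [l2[k]'(by omega)] := by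
        rw [List.take_add_one, List.getElem?_eq_getElem (by omega)]
        rfl
      rw [h, hcan_snoc]
    have ht1 : (hcan (l1.take k) * 131 + ((l1[k]'(by omega)).toNat : Int)) % 2305843009213693951
        = hcan (l1.take (k + 1)) := by
      have h : l1.take (k + 1) = l1.take k ++ [l1[k]'(by omega)] := by
        rw [List.take_add_one, List.getElem?_eq_getElem (by omega)]
        rfl
      rw [h, hcan_snoc]
    have hpw : (131 : Int) ^ k % 2305843009213693951 * 131 % 2305843009213693951
        = 131 ^ (k + 1) % 2305843009213693951 := by
      conv_rhs => rw [pow_succ, Int.mul_emod]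
      norm_num
    rw [hd1, hd2, ht1, ht2, hpw]
    have s1 : PySem.List.slice l1 (some (-((k : Int) + 1))) none = l1.drop (l1.length - (k + 1)) := by
      rw [show -((k : Int) + 1) = -(((k + 1 : Nat)) : Int) from by push_cast; ring,
        PySem.List.slice_from_neg_natCast _ _ (by omega)]
    have s1' : PySem.List.slice l2 (some (-((k : Int) + 1))) none = l2.drop (l2.length - (k + 1)) := by
      rw [show -((k : Int) + 1) = -(((k + 1 : Nat)) : Int) from by push_cast; ring,
        PySem.List.slice_from_neg_natCast _ _ (by omega)]
    have s2 : PySem.List.slice l2 none (some ((k : Int) + 1)) = l2.take (k + 1) := by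
      rw [eKp, PySem.List.slice_to_natCast]
    have s2' : PySem.List.slice l1 none (some ((k : Int) + 1)) = l1.take (k + 1) := by
      rw [eKp, PySem.List.slice_to_natCast]
    have s3 : PySem.List.slice l1 none (some (-((k : Int) + 1))) = l1.take (l1.length - (k + 1)) := by
      rw [show -((k : Int) + 1) = -(((k + 1 : Nat)) : Int) from by push_cast; ring,
        PySem.List.slice_to_neg_natCast _ _ (by omega)]
    have s3' : PySem.List.slice l2 none (some (-((k : Int) + 1))) = l2.take (l2.length - (k + 1)) := by
      rw [show -((k : Int) + 1) = -(((k + 1 : Nat)) : Int) from by push_cast; ring,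
        PySem.List.slice_to_neg_natCast _ _ (by omega)]
    have s4 : PySem.List.slice l1 (some ((l1.length : Int) - ((k : Int) + 1))) none
        = l1.drop (l1.length - (k + 1)) := by
      rw [e1, PySem.List.slice_from_natCast]
    have s4' : PySem.List.slice l2 (some ((l2.length : Int) - ((k : Int) + 1))) none
        = l2.drop (l2.length - (k + 1)) := by
      rw [e2, PySem.List.slice_from_natCast]
    have s5 : PySem.List.slice l1 none (some ((l1.length : Int) - ((k : Int) + 1)))
        = l1.take (l1.length - (k + 1)) := by
      rw [e1, PySem.List.slice_to_natCast]
    have s5' : PySem.List.slice l2 none (some ((l2.length : Int) - ((k : Int) + 1)))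
        = l2.take (l2.length - (k + 1)) := by
      rw [e2, PySem.List.slice_to_natCast]
    by_cases hcase : lo ≤ (k : Int) + 1
    · simp only [if_pos hcase]
      have hAsplit : PySem.List.pyRange lo (((k + 1 : Nat) : Int) + 1) 1
          = PySem.List.pyRange lo ((k : Int) + 1) 1 ++ [(k : Int) + 1] := by
        push_cast
        exact PySem.List.pyRange_one_succ_right hcase
      rw [hAsplit, List.foldl_append]
      simp only [List.foldl_cons, List.foldl_nil, astep]
      rw [s1, s1', s2, s2', s3, s3', s4, s4', s5, s5']
      by_cases c1 : l1.drop (l1.length - (k + 1)) = l2.take (k + 1)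
      · have hh1 : hcan (l1.drop (l1.length - (k + 1))) = hcan (l2.take (k + 1)) := by rw [c1]
        by_cases c2 : l2.drop (l2.length - (k + 1)) = l1.take (k + 1)
        · have hh2 : hcan (l2.drop (l2.length - (k + 1))) = hcan (l1.take (k + 1)) := by rw [c2]
          simp [c1, c2]
        · simp [c1, c2]
      · by_cases c2 : l2.drop (l2.length - (k + 1)) = l1.take (k + 1)
        · have hh2 : hcan (l2.drop (l2.length - (k + 1))) = hcan (l1.take (k + 1)) := by rw [c2]
          simp [c1, c2]
        · simp [c1, c2]
    · simp only [if_neg hcase]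
      rw [PySem.List.pyRange_one_eq_nil (show ((k + 1 : Nat) : Int) + 1 ≤ lo from by push_cast; omega),
        PySem.List.pyRange_one_eq_nil (show ((k : Nat) : Int) + 1 ≤ lo from by omega)]
    

-- the degenerate loop when one string is empty: range(0, 1) with overlap 0
lemma base_empty (l1 l2 : List Char) (h : min l1.length l2.length = 0) :
    (PySem.List.pyRange 0 1 1).foldl (astep l1 l2) PySem.Set.empty
      = PySem.Set.add PySem.Set.empty (String.ofList (l1 ++ l2)) := by
  have hr : PySem.List.pyRange 0 1 1 = [0] := by
    rw [PySem.List.pyRange_one_cons (by norm_num), PySem.List.pyRange_one_eq_nil (by norm_num)]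
  rw [hr]
  simp only [List.foldl_cons, List.foldl_nil, astep, neg_zero]
  have t1 : PySem.List.slice l1 none (some 0) = [] := by
    rw [PySem.List.slice_to l1 (b := 0) (by norm_num)]; simp
  have t2 : PySem.List.slice l2 none (some 0) = [] := by
    rw [PySem.List.slice_to l2 (b := 0) (by norm_num)]; simp
  simp only [PySem.List.slice_zero_start, PySem.List.slice_none_none, t1, t2]
  rcases Nat.min_eq_zero_iff.mp h with h' | h'
  · have hl : l1 = [] := List.eq_nil_of_length_eq_zero h'
    subst hl
    by_cases h2 : l2 = []
    · subst h2; simp [PySem.Set.add]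
    · simp [h2, PySem.Set.add]
  · have hl : l2 = [] := List.eq_nil_of_length_eq_zero h'
    subst hl
    by_cases h1 : l1 = []
    · subst h1; simp [PySem.Set.add]
    · simp [h1, PySem.Set.add]

-- ===== VERDICT (by name: the statement is the Claim_ definition above) =====
theorem joins_spec : Claim_equal_joins := by
  unfold Claim_equal_joins Spec_joins
  intro str1 str2 _
  unfold joins joins_alt
  simp only []
  rw [lo_eq]
  by_cases h0 : min str1.toList.length str2.toList.length = 0
  · rw [if_pos h0, h0]
    have h1 : PySem.Int.floordiv (((0 : Nat) : Int) + 1) 2 = 0 := by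
      rw [PySem.Int.floordiv_eq_ediv_of_pos (by norm_num)]
      decide
    rw [h1]
    exact base_empty _ _ h0
  · rw [if_neg h0]
    have hinv := loop_inv str1.toList str2.toList
      (PySem.Int.floordiv (((min str1.toList.length str2.toList.length : Nat) : Int) + 1) 2)
      (lo_pos _ (by omega)) (min str1.toList.length str2.toList.length) (le_refl _)
    rw [hinv]
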